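-- pv_equiv track=rewrite | github.com/catcatAI/Unified-AI-Project | archived_fix_scripts/comprehensive_syntax_fix.py | fix_incomplete_structures
-- ===== SOURCE A (Python) =====
-- from typing import List, Tuple, Optional
--
-- def fix_incomplete_structures(content: str) -> Tuple[str, int]:
--     """修复不完整的代码结构"""
--     lines = content.split('\n')
--     fixed_lines = []
--     fixes = 0
--
--     for i, line in enumerate(lines):
--         stripped = line.strip()
--
--         # 修复不完整的try语句
--         if stripped == 'try:' and i < len(lines) - 1:
--             next_line = lines[i + 1].strip()
--             if not next_line or next_line.startswith('#'):
--                 # try: 后面没有实际内容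
--                 fixed_lines.append(line)
--                 fixed_lines.append('    pass')
--                 fixes += 1
--                 continue
--
--         # 修复不完整的函数定义
--         if stripped.startswith('def ') and stripped.endswith(':'):
--             # 检查函数体
--             has_body = False
--             for j in range(i + 1, min(i + 5, len(lines))):
--                 if lines[j].strip() and not lines[j].strip().startswith('#'):
--                     has_body = True
--                     break
--
--             if not has_body:
--                 fixed_lines.append(line)
--                 fixed_lines.append('    pass')
--                 fixes += 1
--                 continue
--
--         # 修复不完整的类定义
--         if stripped.startswith('class ') and stripped.endswith(':'):
--             # 检查类体
--             has_body = False
--             for j in range(i + 1, min(i + 5, len(lines))):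
--                 if lines[j].strip() and not lines[j].strip().startswith('#'):
--                     has_body = True
--                     break
--
--             if not has_body:
--                 fixed_lines.append(line)
--                 fixed_lines.append('    pass')
--                 fixes += 1
--                 continue
--
--         fixed_lines.append(line)
--
--     return '\n'.join(fixed_lines), fixes
-- ===== SOURCE B (Python) =====
-- def fix_incomplete_structures(content):
--     """Precompute a backward distance-to-next-content table, then one forward emit pass."""
--     lines = content.split('\n')
--     n = len(lines)
--     INF = 1000000000
--     # dist[i] = number of lines from i to the next "content" line (0 if line i itself
--     # is content); dist[n] is a huge sentinel meaning "no content below".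
--     dist = [INF] * (n + 1)
--     for i in range(n - 1, -1, -1):
--         s = lines[i].strip()
--         dist[i] = 0 if (s and not s.startswith('#')) else dist[i + 1] + 1
--     out = []
--     fixes = 0
--     for i, line in enumerate(lines):
--         s = line.strip()
--         out.append(line)
--         if s == 'try:':
--             need = i < n - 1 and dist[i + 1] > 0
--         elif (s.startswith('def ') or s.startswith('class ')) and s.endswith(':'):
--             need = dist[i + 1] >= min(4, n - 1 - i)
--         else:
--             need = False
--         if need:
--             out.append('    pass')
--             fixes += 1
--     return '\n'.join(out), fixes
-- ===== Notes on version B (the rewrite author's own statement) =====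
-- stated objective: alternative
-- what changed: A re-scans up to 4 following lines for every def/class header and re-strips the next line for every try: header; B precomputes in one backward pass a distance-to-next-content table and then makes a single forward emit pass that decides each insertion by comparing the precomputed distance against the window length, removing all inner lookahead scans.
import Mathlib
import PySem

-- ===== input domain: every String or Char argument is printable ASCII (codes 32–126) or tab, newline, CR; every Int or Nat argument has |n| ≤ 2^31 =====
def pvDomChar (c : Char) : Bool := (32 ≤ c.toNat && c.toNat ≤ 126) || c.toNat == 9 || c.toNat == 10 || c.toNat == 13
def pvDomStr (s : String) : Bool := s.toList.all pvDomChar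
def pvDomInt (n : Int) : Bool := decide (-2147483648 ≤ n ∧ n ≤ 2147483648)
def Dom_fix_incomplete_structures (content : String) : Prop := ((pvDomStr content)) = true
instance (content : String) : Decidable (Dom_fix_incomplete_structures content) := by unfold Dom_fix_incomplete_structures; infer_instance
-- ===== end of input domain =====

-- B replaces A's per-line lookahead scans with one backward distance-to-next-content table
-- and a single forward emit pass (alternative decomposition, same result).


-- ===== PORT A =====
-- literal transliteration of A's loop body; the three 'continue' branches become an Option
-- chain, the inner 'for j … break' becomes List.any over the same pyRange
def stepA (lines : List String) (acc : List String × Int) (p : Int × String) : List String × Int :=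
  let n := lines.length
  let i := p.1
  let line := p.2
  let stripped := PySem.Str.strip line
  let r1 : Option (List String × Int) :=
    if stripped == "try:" && decide (i < (n : Int) - 1) then
      let next_line := PySem.Str.strip (PySem.List.pyGetD lines (i + 1) "")
      if next_line == "" || PySem.Str.startswith next_line "#" then
        some (acc.1 ++ [line, "    pass"], acc.2 + 1)
      else none
    else none
  match r1 with
  | some r => r
  | none =>
    let r2 : Option (List String × Int) :=
      if PySem.Str.startswith stripped "def " && PySem.Str.endswith stripped ":" then
        let has_body := (PySem.List.pyRange (i + 1) (min (i + 5) (n : Int)) 1).any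
          (fun j =>
            let s := PySem.Str.strip (PySem.List.pyGetD lines j "")
            s != "" && !PySem.Str.startswith s "#")
        if !has_body then some (acc.1 ++ [line, "    pass"], acc.2 + 1) else none
      else none
    match r2 with
    | some r => r
    | none =>
      let r3 : Option (List String × Int) :=
        if PySem.Str.startswith stripped "class " && PySem.Str.endswith stripped ":" then
          let has_body := (PySem.List.pyRange (i + 1) (min (i + 5) (n : Int)) 1).any
            (fun j =>
              let s := PySem.Str.strip (PySem.List.pyGetD lines j "")
              s != "" && !PySem.Str.startswith s "#")
          if !has_body then some (acc.1 ++ [line, "    pass"], acc.2 + 1) else none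
        else none
      match r3 with
      | some r => r
      | none => (acc.1 ++ [line], acc.2)

def fix_incomplete_structures (content : String) : String × Int :=
  let lines := (PySem.Str.split? content "\n").getD []
  let res := (PySem.List.enumerate lines 0).foldl (stepA lines) ([], 0)
  (PySem.Str.join "\n" res.1, res.2)

-- ===== PORT B =====
-- Source B's "content line" test (stripped nonempty and not a comment)
def pvContent (l : String) : Bool :=
  let s := PySem.Str.strip l
  s != "" && !PySem.Str.startswith s "#"

-- Source B's backward pass: dist[i] = lines from i to the next content line; dist[n] is the
-- huge sentinel 10^9 ("no content below")
def pvDist : List String → List Int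
  | [] => [1000000000]
  | l :: rest =>
    let d := pvDist rest
    (if pvContent l then 0 else d.headD 1000000000 + 1) :: d

-- Source B's forward emit pass body, consulting the precomputed table
def stepB (lines : List String) (dist : List Int) (acc : List String × Int) (p : Int × String) : List String × Int :=
  let n := lines.length
  let i := p.1
  let line := p.2
  let s := PySem.Str.strip line
  let need : Bool :=
    if s == "try:" then
      decide (i < (n : Int) - 1) && decide (PySem.List.pyGetD dist (i + 1) 0 > 0)
    else if (PySem.Str.startswith s "def " || PySem.Str.startswith s "class ") &&
            PySem.Str.endswith s ":" then
      decide (PySem.List.pyGetD dist (i + 1) 0 ≥ min 4 ((n : Int) - 1 - i))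
    else false
  if need then (acc.1 ++ [line, "    pass"], acc.2 + 1) else (acc.1 ++ [line], acc.2)

def fix_incomplete_structures_alt (content : String) : String × Int :=
  let lines := (PySem.Str.split? content "\n").getD []
  let dist := pvDist lines
  let res := (PySem.List.enumerate lines 0).foldl (stepB lines dist) ([], 0)
  (PySem.Str.join "\n" res.1, res.2)

-- ===== PRECONDITION & SPEC =====
def Spec_fix_incomplete_structures (content : String) (out : String × Int) : Prop := out = fix_incomplete_structures_alt content
instance (content : String) (out : String × Int) : Decidable (Spec_fix_incomplete_structures content out) := by unfold Spec_fix_incomplete_structures; infer_instance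

-- ===== CLAIM (what is proved, stated in full; the proofs are below) =====
def Claim_equal_fix_incomplete_structures : Prop := ∀ (content : String), Dom_fix_incomplete_structures content → Spec_fix_incomplete_structures content (fix_incomplete_structures content)

-- ===== LEMMAS AND PROOFS =====

-- the per-line "append '    pass'" decision of A, extracted
def addA (lines : List String) (i : Int) (line : String) : Bool :=
  let n : Int := lines.length
  let stripped := PySem.Str.strip line
  (stripped == "try:" && decide (i < n - 1) &&
    (let next_line := PySem.Str.strip (PySem.List.pyGetD lines (i + 1) "")
     next_line == "" || PySem.Str.startswith next_line "#"))
  || (((PySem.Str.startswith stripped "def " || PySem.Str.startswith stripped "class ") &&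
       PySem.Str.endswith stripped ":") &&
    !(PySem.List.pyRange (i + 1) (min (i + 5) n) 1).any
        (fun j =>
          let s := PySem.Str.strip (PySem.List.pyGetD lines j "")
          s != "" && !PySem.Str.startswith s "#"))

-- the per-line decision of B, extracted
def addB (lines : List String) (i : Int) (line : String) : Bool :=
  let n : Int := lines.length
  let s := PySem.Str.strip line
  if s == "try:" then
    decide (i < n - 1) && decide (PySem.List.pyGetD (pvDist lines) (i + 1) 0 > 0)
  else if (PySem.Str.startswith s "def " || PySem.Str.startswith s "class ") &&
          PySem.Str.endswith s ":" then
    decide (PySem.List.pyGetD (pvDist lines) (i + 1) 0 ≥ min 4 (n - 1 - i))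
  else false

set_option maxHeartbeats 4000000 in
lemma stepA_pt (lines : List String) (acc : List String × Int) (p : Int × String) :
    stepA lines acc p =
      (acc.1 ++ p.2 :: (if addA lines p.1 p.2 then ["    pass"] else []),
       acc.2 + (if addA lines p.1 p.2 then 1 else 0)) := by
  simp only [stepA, addA]
  rcases Bool.eq_false_or_eq_true (PySem.Str.strip p.2 == "try:") with ha | ha <;>
  rcases Bool.eq_false_or_eq_true (decide (p.1 < (lines.length : Int) - 1)) with hc | hc <;>
  rcases Bool.eq_false_or_eq_true (PySem.Str.strip (PySem.List.pyGetD lines (p.1 + 1) "") == "" ||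
      PySem.Str.startswith (PySem.Str.strip (PySem.List.pyGetD lines (p.1 + 1) "")) "#") with hb2 | hb2 <;>
  rcases Bool.eq_false_or_eq_true (PySem.Str.startswith (PySem.Str.strip p.2) "def ") with hsd | hsd <;>
  rcases Bool.eq_false_or_eq_true (PySem.Str.startswith (PySem.Str.strip p.2) "class ") with hsc | hsc <;>
  rcases Bool.eq_false_or_eq_true (PySem.Str.endswith (PySem.Str.strip p.2) ":") with he | he <;>
  rcases Bool.eq_false_or_eq_true ((PySem.List.pyRange (p.1 + 1) (min (p.1 + 5) (lines.length : Int)) 1).any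
      (fun j =>
        let s := PySem.Str.strip (PySem.List.pyGetD lines j "")
        s != "" && !PySem.Str.startswith s "#")) with hb4 | hb4 <;>
  simp only [ha, hc, hb2, hsd, hsc, he, hb4, Bool.and_true, Bool.and_false, Bool.or_true,
    Bool.or_false, Bool.not_true, Bool.not_false, if_true, if_false, Bool.false_eq_true,
    Int.add_zero]
lemma stepB_pt (lines : List String) (acc : List String × Int) (p : Int × String) :
    stepB lines (pvDist lines) acc p =
      (acc.1 ++ p.2 :: (if addB lines p.1 p.2 then ["    pass"] else []),
       acc.2 + (if addB lines p.1 p.2 then 1 else 0)) := by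
  simp only [stepB, addB]
  split_ifs <;> simp_all

lemma foldl_emit {α β : Type} (f : α → List β) (c : α → Int) :
    ∀ (l : List α) (a0 : List β) (k0 : Int),
      l.foldl (fun acc x => (acc.1 ++ f x, acc.2 + c x)) (a0, k0) =
        (a0 ++ l.flatMap f, k0 + (l.map c).sum) := by
  intro l
  induction l with
  | nil => intro a0 k0; simp
  | cons x xs ih =>
    intro a0 k0
    simp only [List.foldl_cons, ih, List.flatMap_cons, List.map_cons, List.sum_cons]
    refine Prod.ext (by simp) ?_
    simp only []
    ring_nf

lemma pvDist_ne_nil : ∀ (ls : List String), pvDist ls ≠ [] := by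
  intro ls; cases ls <;> simp [pvDist]

lemma pvDist_headD_sentinel (ls : List String) :
    (pvDist ls).headD 1000000000 = (pvDist ls).headD 0 := by
  cases h : pvDist ls
  · exact absurd h (pvDist_ne_nil ls)
  · simp

lemma pvDist_headD_nonneg : ∀ (ls : List String), 0 ≤ (pvDist ls).headD 0 := by
  intro ls
  induction ls with
  | nil => simp [pvDist]
  | cons l rest ih =>
    simp only [pvDist, List.headD_cons]
    rw [pvDist_headD_sentinel]
    split
    · omega
    · omega

lemma pvDist_drop : ∀ (ls : List String) (k : Nat), k ≤ ls.length →
    (pvDist ls).drop k = pvDist (ls.drop k) := by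
  intro ls
  induction ls with
  | nil =>
    intro k hk
    have hk0 : k = 0 := by simpa using hk
    subst hk0; simp
  | cons l rest ih =>
    intro k hk
    cases k with
    | zero => simp
    | succ k' =>
      simp only [pvDist, List.drop_succ_cons]
      exact ih k' (by simpa using hk)

lemma pvDist_headD_ge_iff : ∀ (ls : List String) (m : Int), m ≤ 1000000000 →
    (m ≤ (pvDist ls).headD 0 ↔
      ∀ (j : Nat) (hj : j < ls.length), (j : Int) < m → pvContent ls[j] = false) := by
  intro ls
  induction ls with
  | nil => intro m hm; simp [pvDist]; omega
  | cons l rest ih =>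
    intro m hm
    simp only [pvDist, List.headD_cons]
    by_cases hc : pvContent l = true
    · simp only [if_pos hc]
      constructor
      · intro h0 j hj hjm
        exfalso
        have : (0:Int) ≤ (j:Int) := by positivity
        omega
      · intro h
        by_contra hlt
        push_neg at hlt
        have := h 0 (by simp) (by omega)
        simp [hc] at this
    · have hc' : pvContent l = false := by simpa using hc
      simp only [if_neg hc, pvDist_headD_sentinel]
      have ihm := ih (m - 1) (by omega)
      have hnn := pvDist_headD_nonneg rest
      constructor
      · intro h j hj hjm
        cases j with
        | zero => simpa using hc'
        | succ j' =>
          have hjm' : (j' : Int) < m - 1 := by push_cast at hjm ⊢; omega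
          have hj' : j' < rest.length := by simpa using hj
          have := ihm.1 (by omega) j' hj' hjm'
          simpa using this
      · intro h
        have hrest : ∀ (j : Nat) (hj : j < rest.length), (j : Int) < m - 1 → pvContent rest[j] = false := by
          intro j hj hjm
          have := h (j + 1) (by simpa using Nat.succ_lt_succ hj) (by push_cast at hjm ⊢; omega)
          simpa using this
        have := ihm.2 hrest
        omega

lemma dist_lookup (ls : List String) (k : Nat) (hk : k ≤ ls.length) :
    PySem.List.pyGetD (pvDist ls) ((k : Nat) : Int) 0 = (pvDist (ls.drop k)).headD 0 := by
  rw [PySem.List.pyGetD_natCast]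
  have h1 : (pvDist ls).getD k 0 = ((pvDist ls).drop k).headD 0 := by
    rw [List.getD_eq_getElem?_getD, ← List.head?_drop]
    cases h : (pvDist ls).drop k <;> simp [h]
  rw [h1, pvDist_drop ls k hk]
lemma not_pvContent (l : String) :
    ((PySem.Str.strip l == "") || PySem.Str.startswith (PySem.Str.strip l) "#") = !pvContent l := by
  simp only [pvContent]
  cases h1 : (PySem.Str.strip l == "") <;> cases h2 : PySem.Str.startswith (PySem.Str.strip l) "#" <;>
    simp_all

lemma add_eq (ls : List String) (k : Nat) (hk : k < ls.length) (line : String) :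
    addA ls ((k : Nat) : Int) line = addB ls ((k : Nat) : Int) line := by
  have hcast : ((k : Nat) : Int) + 1 = (((k + 1 : Nat) : Nat) : Int) := by push_cast; ring
  have hlook : PySem.List.pyGetD (pvDist ls) (((k : Nat) : Int) + 1) 0 =
      (pvDist (ls.drop (k + 1))).headD 0 := by
    rw [hcast]; exact dist_lookup ls (k + 1) (by omega)
  simp only [addA, addB]
  by_cases ht : (PySem.Str.strip line == "try:") = true
  · have hs : PySem.Str.strip line = "try:" := (beq_iff_eq).1 ht
    have hdef : PySem.Str.startswith "try:" "def " = false := by decide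
    have hcls : PySem.Str.startswith "try:" "class " = false := by decide
    rw [hs]
    simp only [ht, hs, hdef, hcls, Bool.false_or, Bool.false_and, Bool.and_false, Bool.or_false,
      Bool.true_and, beq_self_eq_true, eq_self_iff_true, if_true, reduceIte]
    by_cases hlt : ((k : Nat) : Int) < (ls.length : Int) - 1
    · have hk1 : k + 1 < ls.length := by push_cast at hlt; omega
      have hnext : PySem.List.pyGetD ls (((k : Nat) : Int) + 1) "" = ls[k + 1] := by
        rw [hcast, PySem.List.pyGetD_natCast, List.getD_eq_getElem?_getD,
          List.getElem?_eq_getElem hk1]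
        rfl
      have hchar := pvDist_headD_ge_iff (ls.drop (k + 1)) 1 (by omega)
      have hlen' : 0 < (ls.drop (k + 1)).length := by simp; omega
      have hiff : (0 < (pvDist (ls.drop (k + 1))).headD 0) ↔ pvContent ls[k + 1] = false := by
        rw [show ((0:Int) < (pvDist (ls.drop (k+1))).headD 0) ↔ ((1:Int) ≤ (pvDist (ls.drop (k+1))).headD 0) by omega,
          hchar]
        constructor
        · intro h
          have := h 0 hlen' (by omega)
          simpa using this
        · intro h j hj hjm
          have hj0 : j = 0 := by omega
          subst hj0
          simpa using h
      have hb : decide ((0:Int) < (pvDist (ls.drop (k + 1))).headD 0) = !pvContent ls[k + 1] := by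
        rcases Bool.eq_false_or_eq_true (pvContent ls[k + 1]) with h | h <;> simp_all
      rw [hlook, hnext, not_pvContent, hb]
    · simp [hlt]
  · have ht' : (PySem.Str.strip line == "try:") = false := by simpa using ht
    simp only [ht', Bool.false_and, Bool.false_or, if_neg (by simp : ¬ (false = true))]
    by_cases hg : ((PySem.Str.startswith (PySem.Str.strip line) "def " ||
        PySem.Str.startswith (PySem.Str.strip line) "class ") &&
        PySem.Str.endswith (PySem.Str.strip line) ":") = true
    · simp only [hg, if_pos rfl, if_true, Bool.true_and]
      rw [hlook]
      have hchar := pvDist_headD_ge_iff (ls.drop (k + 1))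
        (min 4 ((ls.length : Int) - 1 - ((k : Nat) : Int))) (by push_cast; omega)
      have hlam : (fun j : Int =>
            let s := PySem.Str.strip (PySem.List.pyGetD ls j "")
            s != "" && !PySem.Str.startswith s "#") =
          (fun j : Int => pvContent (PySem.List.pyGetD ls j "")) := rfl
      have hany : ((PySem.List.pyRange (((k : Nat) : Int) + 1)
            (min (((k : Nat) : Int) + 5) (ls.length : Int)) 1).any
            (fun j => pvContent (PySem.List.pyGetD ls j ""))) = false ↔
          (min 4 ((ls.length : Int) - 1 - ((k : Nat) : Int)) ≤
            (pvDist (ls.drop (k + 1))).headD 0) := by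
        rw [hchar]
        rw [Bool.eq_false_iff, Ne, List.any_eq_true]
        push_neg
        constructor
        · intro h j hj hjm
          have hjI : ((k : Int) + 1 + j) ∈ PySem.List.pyRange (((k : Nat) : Int) + 1)
              (min (((k : Nat) : Int) + 5) (ls.length : Int)) 1 := by
            rw [PySem.List.mem_pyRange_one]
            simp only [List.length_drop] at hj
            push_cast at hjm ⊢
            omega
          have hfalse := h _ hjI
          have hidx : k + 1 + j < ls.length := by simp at hj; omega
          have hget : PySem.List.pyGetD ls ((k : Int) + 1 + j) "" = ls[k + 1 + j] := by
            have hc2 : ((k : Int) + 1 + j) = (((k + 1 + j : Nat) : Nat) : Int) := by push_cast; ring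
            rw [hc2, PySem.List.pyGetD_natCast, List.getD_eq_getElem?_getD,
              List.getElem?_eq_getElem hidx]
            rfl
          rw [hget] at hfalse
          have hdrop : (ls.drop (k + 1))[j] = ls[k + 1 + j] := by
            rw [List.getElem_drop]
          rw [hdrop]
          simpa using hfalse
        · intro h jI hjI
          rw [PySem.List.mem_pyRange_one] at hjI
          have hj0 : (0:Int) ≤ jI - (k + 1) := by push_cast at hjI; omega
          set j : Nat := (jI - (k + 1)).toNat with hj
          have hjI' : jI = (k : Int) + 1 + j := by push_cast at hjI ⊢; omega
          have hjlt : (j : Int) < min 4 ((ls.length : Int) - 1 - ((k : Nat) : Int)) := by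
            have h2 := hjI.2
            rw [lt_min_iff] at h2 ⊢
            push_cast at h2 hjI ⊢
            omega
          have hjlen : j < (ls.drop (k + 1)).length := by
            have h2 := hjI.2
            rw [lt_min_iff] at h2
            simp only [List.length_drop]
            push_cast at h2 hjI ⊢
            omega
          have hfalse := h j hjlen hjlt
          have hidx : k + 1 + j < ls.length := by simp at hjlen; omega
          have hget : PySem.List.pyGetD ls jI "" = ls[k + 1 + j] := by
            rw [hjI']
            have hc2 : ((k : Int) + 1 + j) = (((k + 1 + j : Nat) : Nat) : Int) := by push_cast; ring
            rw [hc2, PySem.List.pyGetD_natCast, List.getD_eq_getElem?_getD,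
              List.getElem?_eq_getElem hidx]
            rfl
          rw [hget]
          have hdrop : (ls.drop (k + 1))[j] = ls[k + 1 + j] := by rw [List.getElem_drop]
          rw [hdrop] at hfalse
          simp [hfalse]
      rw [hlam]
      rcases Bool.eq_false_or_eq_true ((PySem.List.pyRange (((k : Nat) : Int) + 1)
          (min (((k : Nat) : Int) + 5) (ls.length : Int)) 1).any
          (fun j => pvContent (PySem.List.pyGetD ls j ""))) with hA | hA
      · have hnot : ¬ (min 4 ((ls.length : Int) - 1 - ((k : Nat) : Int)) ≤
            (pvDist (ls.drop (k + 1))).headD 0) := by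
          intro h
          rw [← hany] at h
          simp [hA] at h
        simp only [hA, Bool.not_true, ge_iff_le, decide_eq_false hnot]
      · simp only [hA, Bool.not_false, ge_iff_le, decide_eq_true (hany.1 hA)]
    · have hg' : ((PySem.Str.startswith (PySem.Str.strip line) "def " ||
          PySem.Str.startswith (PySem.Str.strip line) "class ") &&
          PySem.Str.endswith (PySem.Str.strip line) ":") = false := by simpa using hg
      rw [hg']
      simp
lemma ports_eq (content : String) :
    fix_incomplete_structures content = fix_incomplete_structures_alt content := by
  unfold fix_incomplete_structures fix_incomplete_structures_alt
  set ls := (PySem.Str.split? content "\n").getD [] with hls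
  show (PySem.Str.join "\n" (((PySem.List.enumerate ls 0).foldl (stepA ls) ([], 0)).1),
        (((PySem.List.enumerate ls 0).foldl (stepA ls) ([], 0)).2)) =
       (PySem.Str.join "\n" (((PySem.List.enumerate ls 0).foldl (stepB ls (pvDist ls)) ([], 0)).1),
        (((PySem.List.enumerate ls 0).foldl (stepB ls (pvDist ls)) ([], 0)).2))
  have hA : stepA ls = fun acc (p : Int × String) =>
      (acc.1 ++ p.2 :: (if addA ls p.1 p.2 then ["    pass"] else []),
       acc.2 + (if addA ls p.1 p.2 then 1 else 0)) :=
    funext fun acc => funext fun p => stepA_pt ls acc p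
  have hB : stepB ls (pvDist ls) = fun acc (p : Int × String) =>
      (acc.1 ++ p.2 :: (if addB ls p.1 p.2 then ["    pass"] else []),
       acc.2 + (if addB ls p.1 p.2 then 1 else 0)) :=
    funext fun acc => funext fun p => stepB_pt ls acc p
  rw [hA, hB]
  rw [foldl_emit (fun p : Int × String => p.2 :: (if addA ls p.1 p.2 then ["    pass"] else []))
      (fun p : Int × String => if addA ls p.1 p.2 then 1 else 0) (PySem.List.enumerate ls 0) [] 0,
    foldl_emit (fun p : Int × String => p.2 :: (if addB ls p.1 p.2 then ["    pass"] else []))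
      (fun p : Int × String => if addB ls p.1 p.2 then 1 else 0) (PySem.List.enumerate ls 0) [] 0]
  have hpt : ∀ p ∈ PySem.List.enumerate ls 0, addA ls p.1 p.2 = addB ls p.1 p.2 := by
    intro p hp
    rw [PySem.List.mem_enumerate_iff] at hp
    obtain ⟨k, hk, rfl⟩ := hp
    simpa using add_eq ls k hk ls[k]
  have hflat : (PySem.List.enumerate ls 0).flatMap
        (fun p : Int × String => p.2 :: (if addA ls p.1 p.2 then ["    pass"] else [])) =
      (PySem.List.enumerate ls 0).flatMap
        (fun p : Int × String => p.2 :: (if addB ls p.1 p.2 then ["    pass"] else [])) := by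
    rw [List.flatMap_def, List.flatMap_def]
    congr 1
    exact List.map_congr_left (fun p hp => by rw [hpt p hp])
  have hsum : ((PySem.List.enumerate ls 0).map
        (fun p : Int × String => if addA ls p.1 p.2 then (1:Int) else 0)).sum =
      ((PySem.List.enumerate ls 0).map
        (fun p : Int × String => if addB ls p.1 p.2 then (1:Int) else 0)).sum := by
    congr 1
    exact List.map_congr_left (fun p hp => by rw [hpt p hp])
  rw [hflat, hsum]

theorem fix_incomplete_structures_spec : Claim_equal_fix_incomplete_structures := by
  intro content _
  unfold Spec_fix_incomplete_structures
  exact ports_eq content
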